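-- pv_equiv track=rewrite | github.com/vadumont/ZZCoin | Python/RdN.py | vectorToNumber
-- ===== SOURCE A (Python) =====
-- def vectorToNumber(vector):
--
-- 	maximun = 0
-- 	indice = 0
-- 	for i in range(len(vector)):
-- 		if vector[i][0] >= maximun:
-- 			maximun = vector[i][0]
-- 			indice = i
-- 	return(indice)
-- ===== SOURCE B (Python) =====
-- def vectorToNumber(vector):
--     firsts = [v[0] for v in vector]
--     M = max(firsts + [0])
--     for i in reversed(range(len(firsts))):
--         if firsts[i] == M:
--             return i
--     return 0
-- ===== Notes on version B (the rewrite author's own statement) =====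
-- stated objective: alternative
-- what changed: Replaces A's single interleaved running-max/index scan with an aggregate-then-locate decomposition: one pass computes the maximum first element (with the 0 baseline), a second reverse scan returns the last index attaining it (0 if none).
import Mathlib
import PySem

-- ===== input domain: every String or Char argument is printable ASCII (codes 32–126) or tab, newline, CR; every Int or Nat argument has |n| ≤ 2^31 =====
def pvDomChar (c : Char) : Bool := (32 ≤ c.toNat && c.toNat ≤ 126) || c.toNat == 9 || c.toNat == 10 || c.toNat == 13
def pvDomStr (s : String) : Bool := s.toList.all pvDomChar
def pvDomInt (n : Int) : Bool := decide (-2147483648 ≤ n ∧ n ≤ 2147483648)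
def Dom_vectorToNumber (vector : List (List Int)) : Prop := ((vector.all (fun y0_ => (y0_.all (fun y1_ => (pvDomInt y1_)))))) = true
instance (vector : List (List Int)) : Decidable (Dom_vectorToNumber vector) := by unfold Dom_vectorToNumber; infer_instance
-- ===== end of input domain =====

-- B replaces A's single interleaved running-max/index scan by an aggregate-then-locate
-- decomposition (compute the max first, then find its last index); alternative, not faster.


-- ===== PORT A =====
def vectorToNumber (vector : List (List Int)) : Int :=
  ((PySem.List.pyRange 0 (vector.length : Int) 1).foldl
    (fun (p : Int × Int) i =>
      if p.1 ≤ PySem.List.pyGetD (PySem.List.pyGetD vector i []) 0 0 then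
        (PySem.List.pyGetD (PySem.List.pyGetD vector i []) 0 0, i)
      else p) (0, 0)).2

-- ===== PORT B =====
def vectorToNumber_alt (vector : List (List Int)) : Int :=
  let firsts := vector.map (fun v => PySem.List.pyGetD v 0 0)
  let M := (PySem.List.max? (firsts ++ [0]) id).getD 0
  match (List.range firsts.length).reverse.find? (fun i : Nat => PySem.List.pyGetD firsts (i : Int) 0 == M) with
  | some i => (i : Int)
  | none => 0

-- ===== PRECONDITION & SPEC =====
-- Pre_ excludes vectors containing an empty row: there Python A (and B) raises IndexError on vector[i][0].
def Pre_vectorToNumber (vector : List (List Int)) : Prop := ∀ r ∈ vector, r ≠ []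
instance (vector : List (List Int)) : Decidable (Pre_vectorToNumber vector) := by unfold Pre_vectorToNumber; infer_instance
def pvWitness_vectorToNumber : List (List Int) := [[3, 1], [5], [5, 2], [-1]]

def Spec_vectorToNumber (vector : List (List Int)) (out : Int) : Prop := out = vectorToNumber_alt vector
instance (vector : List (List Int)) (out : Int) : Decidable (Spec_vectorToNumber vector out) := by unfold Spec_vectorToNumber; infer_instance

-- ===== CLAIM (what is proved, stated in full; the proofs are below) =====
def Claim_equal_vectorToNumber : Prop := ∀ (vector : List (List Int)), Dom_vectorToNumber vector → Pre_vectorToNumber vector → Spec_vectorToNumber vector (vectorToNumber vector)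

-- ===== LEMMAS AND PROOFS =====

lemma foldl_max_sup (l : List Int) (a b : Int) :
    l.foldl max (max a b) = max (l.foldl max a) b := by
  induction l generalizing a with
  | nil => simp
  | cons x t ih =>
    simp only [List.foldl_cons]
    rw [max_right_comm, ih]

lemma max?_cons_cons (a x : Int) (t : List Int) :
    PySem.List.max? (a :: x :: t) id = PySem.List.max? (max a x :: t) id := by
  by_cases h : a < x
  · simp [PySem.List.max?, h, max_eq_right h.le]
  · simp [PySem.List.max?, h, max_eq_left (not_lt.mp h)]

lemma max?_cons_eq : ∀ (l : List Int) (a : Int), PySem.List.max? (a :: l) id = some (l.foldl max a)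
  | [], a => by simp [PySem.List.max?]
  | x :: t, a => by rw [max?_cons_cons, max?_cons_eq t (max a x), List.foldl_cons]

lemma loopA (vector : List (List Int)) :
    ∀ n : Nat, n ≤ vector.length →
    (PySem.List.pyRange 0 (n : Int) 1).foldl
        (fun (p : Int × Int) i =>
          if p.1 ≤ PySem.List.pyGetD (PySem.List.pyGetD vector i []) 0 0 then
            (PySem.List.pyGetD (PySem.List.pyGetD vector i []) 0 0, i)
          else p) (0, 0)
      = (((vector.map (fun v => PySem.List.pyGetD v 0 0)).take n).foldl max 0,
         match (List.range n).reverse.find? (fun i : Nat =>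
             PySem.List.pyGetD (vector.map (fun v => PySem.List.pyGetD v 0 0)) (i : Int) 0
               == ((vector.map (fun v => PySem.List.pyGetD v 0 0)).take n).foldl max 0) with
         | some i => (i : Int)
         | none => 0) := by
  intro n
  induction n with
  | zero => intro _; simp
  | succ n ih =>
    intro h
    set firsts := vector.map (fun v => PySem.List.pyGetD v 0 0) with hf
    have hn : n < vector.length := h
    have hnf : n < firsts.length := by simp [hf, hn]
    -- the value read at index n, on both sides
    have hvA : PySem.List.pyGetD (PySem.List.pyGetD vector (n : Int) []) 0 0 = firsts[n] := by
      rw [PySem.List.pyGetD_eq_getElem vector ([] : List Int) (by positivity) (by exact_mod_cast hn)]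
      simp [hf]
    have hvB : PySem.List.pyGetD firsts ((n : Nat) : Int) 0 = firsts[n] := by
      rw [PySem.List.pyGetD_eq_getElem firsts (0 : Int) (by positivity) (by exact_mod_cast hnf)]
      simp
    have htake : firsts.take (n + 1) = firsts.take n ++ [firsts[n]] := by
      rw [List.take_add_one, List.getElem?_eq_getElem hnf]
      rfl
    have hF1 : (firsts.take (n + 1)).foldl max 0 = max ((firsts.take n).foldl max 0) firsts[n] := by
      rw [htake, List.foldl_append]
      rfl
    rw [show (((n + 1 : Nat)) : Int) = (n : Int) + 1 by norm_cast,
        PySem.List.pyRange_one_succ_right (by positivity), List.foldl_append,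
        ih (Nat.le_of_succ_le h)]
    simp only [List.foldl_cons, List.foldl_nil]
    rw [List.range_succ, List.reverse_append, List.reverse_singleton, List.singleton_append]
    by_cases hc : (firsts.take n).foldl max 0 ≤ firsts[n]
    · rw [if_pos (by rw [hvA]; exact hc)]
      have hFeq : (firsts.take (n + 1)).foldl max 0 = firsts[n] := by
        rw [hF1, max_eq_right hc]
      rw [List.find?_cons_of_pos (by rw [hvB, hFeq]; simp)]
      rw [hvA, hFeq]
    · rw [not_le] at hc
      rw [if_neg (by rw [hvA]; exact not_le.mpr hc)]
      have hFeq : (firsts.take (n + 1)).foldl max 0 = (firsts.take n).foldl max 0 := by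
        rw [hF1, max_eq_left hc.le]
      rw [List.find?_cons_of_neg (by rw [hvB, hFeq]; simp [ne_of_lt hc])]
      rw [hFeq]

lemma max_baseline (firsts : List Int) :
    (PySem.List.max? (firsts ++ [0]) id).getD 0 = firsts.foldl max 0 := by
  cases firsts with
  | nil => rfl
  | cons a t =>
    rw [List.cons_append, max?_cons_eq, Option.getD_some, List.foldl_append]
    simp only [List.foldl_cons, List.foldl_nil]
    rw [show max (0 : Int) a = max a 0 from max_comm 0 a, foldl_max_sup]

-- ===== VERDICT (by name: the statement is the Claim_ definition above) =====
theorem vectorToNumber_spec : Claim_equal_vectorToNumber := by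
  intro vector _ _
  unfold Spec_vectorToNumber vectorToNumber vectorToNumber_alt
  have hlen : (vector.map (fun v => PySem.List.pyGetD v 0 0)).length = vector.length := by simp
  rw [loopA vector vector.length le_rfl]
  simp only [max_baseline, ← hlen, List.take_length]
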